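-- pv_equiv track=rewrite | github.com/ikokkari/PythonProblems | labs109.py | count_maximal_layers
-- ===== SOURCE A (Python) =====
-- def count_maximal_layers(points):
--     points.sort(key=lambda x: x[0] + x[1])
--     layers = 0
--     while len(points) > 0:
--         layers += 1
--         keep = []
--         for i, p in enumerate(points):
--             for j in range(i+1, len(points)):
--                 if __dominated(p, points[j]):
--                     keep.append(p)
--                     break
--         points = keep
--     return layers
--
-- def __dominated(p1, p2):
--     return p1[0] < p2[0] and p1[1] < p2[1]
-- ===== SOURCE B (Python) =====
-- def count_maximal_layers(points):
--     # Layer count = length of the longest strict-dominance chain (Mirsky):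
--     # one backward DP pass over the sum-sorted list instead of repeated peeling.
--     pts = sorted(points, key=lambda p: p[0] + p[1])
--     seen = []   # (point, height of longest dominance chain starting there)
--     best = 0
--     for p in reversed(pts):
--         x, y = p
--         m = 0
--         for (qx, qy), hq in seen:
--             if hq > m and x < qx and y < qy:
--                 m = hq
--         h = m + 1
--         seen.append((p, h))
--         if h > best:
--             best = h
--     return best
-- ===== Notes on version B (the rewrite author's own statement) =====
-- stated objective: faster
-- what changed: A repeatedly peels off the current layer of maximal points (an O(n^2) scan per layer, rebuilding the list each round); B makes a single backward DP pass over the sum-sorted points computing for each point the length of the longest strict-dominance chain starting there (Mirsky duality: the layer count equals the longest chain), returning the maximum.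
import Mathlib
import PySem

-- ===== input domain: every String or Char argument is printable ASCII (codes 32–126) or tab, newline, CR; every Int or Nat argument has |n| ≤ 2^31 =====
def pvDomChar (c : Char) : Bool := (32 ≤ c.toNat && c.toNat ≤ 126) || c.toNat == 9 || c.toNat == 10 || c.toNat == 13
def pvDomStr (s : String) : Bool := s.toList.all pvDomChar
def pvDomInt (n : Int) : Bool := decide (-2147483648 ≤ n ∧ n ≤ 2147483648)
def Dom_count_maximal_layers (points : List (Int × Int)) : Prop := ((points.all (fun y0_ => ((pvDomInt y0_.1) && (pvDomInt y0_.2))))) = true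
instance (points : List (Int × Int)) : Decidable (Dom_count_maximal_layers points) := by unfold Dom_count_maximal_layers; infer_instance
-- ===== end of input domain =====

-- B replaces A's repeated peeling of maximal points by a single backward DP pass computing
-- longest strict-dominance chain lengths (Mirsky-style); A sorts its argument in place in
-- Python, so the equivalence proved here is about the return value.

-- ===== PORT A =====
-- __dominated(p1, p2)
def pyDominated (p1 p2 : Int × Int) : Bool := decide (p1.1 < p2.1) && decide (p1.2 < p2.2)

-- one iteration of A's while-loop body: keep = points p (in order) for which the inner
-- j-loop finds a dominator at a later index (append + break = filter by "any later dominator")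
def pvKeep (pts : List (Int × Int)) : List (Int × Int) :=
  ((PySem.List.enumerate pts).filter (fun ip =>
    (PySem.List.pyRange (ip.1 + 1) (PySem.List.len pts) 1).any
      (fun j => pyDominated ip.2 (PySem.List.pyGetD pts j (0, 0))))).map (·.2)

-- termination of A's while loop: each round drops at least the last point
theorem pvKeep_length_lt (pts : List (Int × Int)) (h : pts ≠ []) :
    (pvKeep pts).length < pts.length := by
  unfold pvKeep
  rw [List.length_map]
  have hpos : 0 < pts.length := List.length_pos_iff.mpr h
  have hlen : pts.length - 1 < pts.length := by omega
  have hmem : ((((pts.length - 1 : Nat) : Int)), pts[pts.length - 1]'hlen) ∈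
      PySem.List.enumerate pts 0 := by
    rw [PySem.List.mem_enumerate_iff]
    exact ⟨pts.length - 1, hlen, by simp⟩
  rw [← PySem.List.length_enumerate pts 0]
  rw [List.length_filter_lt_length_iff_exists]
  refine ⟨_, hmem, ?_⟩
  have hnil : PySem.List.pyRange (((pts.length - 1 : Nat) : Int) + 1) (PySem.List.len pts) 1 = [] := by
    apply PySem.List.pyRange_one_eq_nil
    rw [PySem.List.len_eq]
    omega
  rw [hnil]
  simp

-- while len(points) > 0: layers += 1; points = keep
def pvLoopA (pts : List (Int × Int)) (layers : Int) : Int :=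
  if h : pts.length > 0 then pvLoopA (pvKeep pts) (layers + 1) else layers
termination_by pts.length
decreasing_by exact pvKeep_length_lt pts (by intro hc; simp [hc] at h)

def count_maximal_layers (points : List (Int × Int)) : Int :=
  pvLoopA (PySem.List.sorted points (fun x => x.1 + x.2)) 0

-- ===== PORT B =====
-- one step of B's backward loop: scan seen for the best dominator height, append, update best
def pvStepB (acc : List ((Int × Int) × Int) × Int) (p : Int × Int) :
    List ((Int × Int) × Int) × Int :=
  let m := acc.1.foldl (fun m qh =>
    if decide (qh.2 > m) && decide (p.1 < qh.1.1) && decide (p.2 < qh.1.2) then qh.2 else m) 0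
  let h := m + 1
  (acc.1 ++ [(p, h)], if h > acc.2 then h else acc.2)

def count_maximal_layers_alt (points : List (Int × Int)) : Int :=
  ((PySem.List.sorted points (fun p => p.1 + p.2)).reverse.foldl pvStepB ([], 0)).2

-- ===== PRECONDITION & SPEC =====
def Spec_count_maximal_layers (points : List (Int × Int)) (out : Int) : Prop := out = count_maximal_layers_alt points
instance (points : List (Int × Int)) (out : Int) : Decidable (Spec_count_maximal_layers points out) := by unfold Spec_count_maximal_layers; infer_instance

-- ===== CLAIM (what is proved, stated in full; the proofs are below) =====
def Claim_equal_count_maximal_layers : Prop := ∀ (points : List (Int × Int)), Dom_count_maximal_layers points → Spec_count_maximal_layers points (count_maximal_layers points)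

-- ===== LEMMAS AND PROOFS =====

def sKey (p : Int × Int) : Int := p.1 + p.2

theorem dom_sKey {p q : Int × Int} (h : pyDominated p q = true) : sKey p < sKey q := by
  unfold pyDominated at h
  simp only [Bool.and_eq_true, decide_eq_true_eq] at h
  unfold sKey; omega

theorem dom_self (p : Int × Int) : pyDominated p p = false := by
  simp [pyDominated]

theorem bool_ext {a b : Bool} (h : a = true ↔ b = true) : a = b := by
  cases a <;> cases b <;> simp_all

-- max of a list of ints with default 0
def mmax (l : List Int) : Int := l.foldr max 0

theorem mmax_nil : mmax [] = 0 := rfl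
theorem mmax_cons (x : Int) (l : List Int) : mmax (x :: l) = max x (mmax l) := rfl

theorem mmax_nonneg (l : List Int) : 0 ≤ mmax l := by
  induction l with
  | nil => simp [mmax_nil]
  | cons x t ih => rw [mmax_cons]; omega

theorem le_mmax {x : Int} {l : List Int} (h : x ∈ l) : x ≤ mmax l := by
  induction l with
  | nil => cases h
  | cons a t ih =>
    rw [mmax_cons]
    rcases List.mem_cons.mp h with h | h
    · omega
    · have := ih h; omega

theorem mmax_le {c : Int} {l : List Int} (hc : 0 ≤ c) (h : ∀ x ∈ l, x ≤ c) : mmax l ≤ c := by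
  induction l with
  | nil => simpa [mmax_nil]
  | cons a t ih =>
    rw [mmax_cons]
    have h1 := h a (List.mem_cons_self)
    have h2 := ih (fun x hx => h x (List.mem_cons_of_mem a hx))
    omega

theorem mmax_mem_or (l : List Int) : mmax l ∈ l ∨ mmax l = 0 := by
  induction l with
  | nil => right; rfl
  | cons a t ih =>
    rw [mmax_cons]
    rcases le_or_gt (mmax t) a with h | h
    · left; rw [max_eq_left h]; exact List.mem_cons_self
    · rw [max_eq_right (le_of_lt h)]
      rcases ih with h' | h'
      · left; exact List.mem_cons_of_mem a h'
      · right; exact h'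

theorem mmax_append (l1 l2 : List Int) : mmax (l1 ++ l2) = max (mmax l1) (mmax l2) := by
  induction l1 with
  | nil =>
    simp only [List.nil_append, mmax_nil]
    exact (max_eq_right (mmax_nonneg l2)).symm
  | cons a t ih => simp only [List.cons_append, mmax_cons, ih]; rw [max_assoc]

theorem mmax_reverse (l : List Int) : mmax l.reverse = mmax l := by
  induction l with
  | nil => rfl
  | cons a t ih =>
    rw [List.reverse_cons, mmax_append, ih, mmax_cons, mmax_cons, mmax_nil]
    have h0 := mmax_nonneg t
    rw [max_comm (mmax t) (max a 0), max_assoc, max_eq_right h0]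

theorem foldl_max_swap (l : List Int) : ∀ a b : Int, l.foldl max (max a b) = max a (l.foldl max b) := by
  induction l with
  | nil => intro a b; rfl
  | cons x t ih =>
    intro a b
    simp only [List.foldl_cons]
    rw [max_assoc, ih]

theorem foldl_max_eq_mmax (l : List Int) : l.foldl max 0 = mmax l := by
  induction l with
  | nil => rfl
  | cons a t ih =>
    simp only [List.foldl_cons, mmax_cons]
    rw [show max (0 : Int) a = max a 0 from max_comm _ _, foldl_max_swap, ih]

-- the shift lemma: max over the (≥2)-filtered, decremented list is max-1
theorem mmax_shift (l : List Int) (_h1 : ∀ x ∈ l, 1 ≤ x) (hM : 1 ≤ mmax l) :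
    mmax ((l.filter (fun x => decide (2 ≤ x))).map (fun x => x - 1)) = mmax l - 1 := by
  by_cases h2 : 2 ≤ mmax l
  · apply le_antisymm
    · apply mmax_le (by omega)
      intro y hy
      simp only [List.mem_map, List.mem_filter, decide_eq_true_eq] at hy
      obtain ⟨x, ⟨hxl, _⟩, rfl⟩ := hy
      have := le_mmax hxl; omega
    · rcases mmax_mem_or l with hm | hm
      · have : mmax l - 1 ∈ (l.filter (fun x => decide (2 ≤ x))).map (fun x => x - 1) := by
          simp only [List.mem_map, List.mem_filter, decide_eq_true_eq]
          exact ⟨mmax l, ⟨hm, h2⟩, rfl⟩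
        exact le_mmax this
      · omega
  · have hm1 : mmax l = 1 := by omega
    have hnil : l.filter (fun x => decide (2 ≤ x)) = [] := by
      rw [List.filter_eq_nil_iff]
      intro x hx
      have := le_mmax hx
      simp only [decide_eq_true_eq]
      omega
    rw [hnil]; simp [mmax_nil]; omega

-- strict countP decrease
theorem countP_lt_countP {α : Type} (l : List α) (q p : α → Bool)
    (himp : ∀ x, q x = true → p x = true) (x : α) (hx : x ∈ l)
    (hpx : p x = true) (hqx : q x = false) : l.countP q < l.countP p := by
  induction l with
  | nil => cases hx
  | cons a t ih =>
    rcases List.mem_cons.mp hx with rfl | hxt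
    · have hle : t.countP q ≤ t.countP p := List.countP_mono_left (fun y _ hy => himp y hy)
      simp only [List.countP_cons, hpx, hqx]
      simp; omega
    · have := ih hxt
      simp only [List.countP_cons]
      by_cases hqa : q a = true
      · have hpa := himp a hqa
        simp [hqa, hpa]; omega
      · simp only [Bool.not_eq_true] at hqa
        simp only [hqa]
        by_cases hpa : p a = true <;> simp [hpa] <;> omega

-- height of the longest strict-dominance chain starting at p, within S
def hgt (S : List (Int × Int)) (p : Int × Int) : Int :=
  1 + mmax (((S.filter (fun q => pyDominated p q)).attach.map (fun q => hgt S q.1)))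
termination_by S.countP (fun q => decide (sKey p < sKey q))
decreasing_by
  have hq := q.2
  rw [List.mem_filter] at hq
  exact countP_lt_countP S _ _
    (fun r hr => by simp only [decide_eq_true_eq] at *; have := dom_sKey hq.2; omega)
    q.1 hq.1 (by simp [dom_sKey hq.2]) (by simp)

theorem hgt_eq (S : List (Int × Int)) (p : Int × Int) :
    hgt S p = 1 + mmax ((S.filter (fun q => pyDominated p q)).map (hgt S)) := by
  rw [hgt]
  congr 1
  exact congrArg mmax (List.attach_map_val)

theorem hgt_ge_one (S : List (Int × Int)) (p : Int × Int) : 1 ≤ hgt S p := by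
  rw [hgt_eq]
  have := mmax_nonneg ((S.filter (fun q => pyDominated p q)).map (hgt S))
  omega

-- the abstract peel and the max height
def filt (S : List (Int × Int)) : List (Int × Int) :=
  S.filter (fun p => S.any (fun q => pyDominated p q))

def maxH (S : List (Int × Int)) : Int := mmax (S.map (hgt S))

theorem maxH_pos (S : List (Int × Int)) (h : S ≠ []) : 1 ≤ maxH S := by
  cases S with
  | nil => exact absurd rfl h
  | cons a t =>
    have hm : hgt (a :: t) a ∈ (a :: t).map (hgt (a :: t)) := by simp
    have h1 := le_mmax hm
    have h2 := hgt_ge_one (a :: t) a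
    unfold maxH; omega

theorem any_iff_hgt_ge_two (S : List (Int × Int)) (p : Int × Int) :
    S.any (fun q => pyDominated p q) = true ↔ 2 ≤ hgt S p := by
  rw [hgt_eq]
  constructor
  · rw [List.any_eq_true]
    rintro ⟨q, hq, hdom⟩
    have hmem : hgt S q ∈ (S.filter (fun q => pyDominated p q)).map (hgt S) := by
      simp only [List.mem_map, List.mem_filter]
      exact ⟨q, ⟨hq, hdom⟩, rfl⟩
    have := le_mmax hmem
    have := hgt_ge_one S q
    omega
  · intro h
    by_contra hc
    have hnil : S.filter (fun q => pyDominated p q) = [] := by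
      rw [List.filter_eq_nil_iff]
      intro q hq hdom
      exact hc (List.any_eq_true.mpr ⟨q, hq, hdom⟩)
    rw [hnil] at h
    simp [mmax_nil] at h

theorem filt_eq (S : List (Int × Int)) :
    filt S = S.filter (fun p => decide (2 ≤ hgt S p)) := by
  unfold filt
  apply List.filter_congr
  intro p _
  apply bool_ext
  exact (any_iff_hgt_ge_two S p).trans (decide_eq_true_iff).symm

-- KEY 1: heights drop by exactly one on the peeled list
theorem hgt_filt (S : List (Int × Int)) :
    ∀ p, 2 ≤ hgt S p → hgt (filt S) p = hgt S p - 1 := by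
  suffices h : ∀ n : Nat, ∀ p, S.countP (fun q => decide (sKey p < sKey q)) ≤ n →
      2 ≤ hgt S p → hgt (filt S) p = hgt S p - 1 by
    intro p hp
    exact h _ p le_rfl hp
  intro n
  induction n with
  | zero =>
    intro p hcnt hp
    exfalso
    rw [← any_iff_hgt_ge_two] at hp
    rw [List.any_eq_true] at hp
    obtain ⟨q, hq, hdom⟩ := hp
    have : 0 < S.countP (fun q => decide (sKey p < sKey q)) :=
      List.countP_pos_iff.mpr ⟨q, hq, by simp [dom_sKey hdom]⟩
    omega
  | succ n ih =>
    intro p hcnt hp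
    rw [hgt_eq (filt S) p]
    have hfilter : (filt S).filter (fun q => pyDominated p q)
        = S.filter (fun q => pyDominated p q && decide (2 ≤ hgt S q)) := by
      rw [filt_eq, List.filter_filter]
    rw [hfilter]
    have hmapcongr : (S.filter (fun q => pyDominated p q && decide (2 ≤ hgt S q))).map (hgt (filt S))
        = (S.filter (fun q => pyDominated p q && decide (2 ≤ hgt S q))).map (fun q => hgt S q - 1) := by
      apply List.map_congr_left
      intro q hq
      rw [List.mem_filter] at hq
      obtain ⟨hqS, hq2⟩ := hq
      simp only [Bool.and_eq_true, decide_eq_true_eq] at hq2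
      apply ih q _ hq2.2
      have hlt : S.countP (fun r => decide (sKey q < sKey r)) < S.countP (fun r => decide (sKey p < sKey r)) := by
        apply countP_lt_countP S _ _
          (fun r hr => by simp only [decide_eq_true_eq] at *; have := dom_sKey hq2.1; omega)
          q hqS (by simp [dom_sKey hq2.1]) (by simp)
      omega
    rw [hmapcongr]
    have hshape : (S.filter (fun q => pyDominated p q && decide (2 ≤ hgt S q))).map (fun q => hgt S q - 1)
        = (((S.filter (fun q => pyDominated p q)).map (hgt S)).filter (fun x => decide (2 ≤ x))).map (fun x => x - 1) := by
      simp only [List.filter_map, List.map_map, List.filter_filter, Function.comp]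
      congr 1
      apply List.filter_congr
      intro q _
      exact Bool.and_comm _ _
    rw [hshape]
    have hM : 1 ≤ mmax ((S.filter (fun q => pyDominated p q)).map (hgt S)) := by
      rw [hgt_eq] at hp; omega
    rw [mmax_shift _ ?_ hM]
    · rw [hgt_eq S p]; omega
    · intro x hx
      simp only [List.mem_map] at hx
      obtain ⟨q, _, rfl⟩ := hx
      exact hgt_ge_one S q

-- KEY 2: the max height drops by exactly one after one peel
theorem maxH_filt (S : List (Int × Int)) (h : S ≠ []) : maxH (filt S) = maxH S - 1 := by
  unfold maxH
  have hcongr : (filt S).map (hgt (filt S)) = (filt S).map (fun q => hgt S q - 1) := by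
    apply List.map_congr_left
    intro q hq
    rw [filt_eq, List.mem_filter] at hq
    exact hgt_filt S q (by simpa using hq.2)
  rw [hcongr, filt_eq]
  have hshape : (S.filter (fun p => decide (2 ≤ hgt S p))).map (fun q => hgt S q - 1)
      = ((S.map (hgt S)).filter (fun x => decide (2 ≤ x))).map (fun x => x - 1) := by
    simp only [List.filter_map, List.map_map]
    rfl
  rw [hshape]
  apply mmax_shift
  · intro x hx
    simp only [List.mem_map] at hx
    obtain ⟨q, _, rfl⟩ := hx
    exact hgt_ge_one S q
  · exact maxH_pos S h

-- sortedness by the sum key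
def Srt (S : List (Int × Int)) : Prop := S.Pairwise (fun a b => sKey a ≤ sKey b)

-- peeling over the enumerate/range indices = plain filter of the projections
theorem enum_filter_snd (pr : (Int × Int) → Bool) :
    ∀ (s : Int) (S : List (Int × Int)),
      ((PySem.List.enumerate S s).filter (fun ip => pr ip.2)).map (·.2) = S.filter pr := by
  intro s S
  induction S generalizing s with
  | nil => simp [PySem.List.enumerate_nil]
  | cons a t ih =>
    rw [PySem.List.enumerate_cons]
    by_cases h : pr a = true <;> simp [h, ih]

-- A's indexed peel equals the abstract peel on a sorted list
theorem pvKeep_eq_filt (S : List (Int × Int)) (hs : Srt S) : pvKeep S = filt S := by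
  unfold pvKeep filt
  have hcongr : (PySem.List.enumerate S 0).filter (fun ip =>
      (PySem.List.pyRange (ip.1 + 1) (PySem.List.len S) 1).any
        (fun j => pyDominated ip.2 (PySem.List.pyGetD S j (0, 0))))
      = (PySem.List.enumerate S 0).filter (fun ip => S.any (fun q => pyDominated ip.2 q)) := by
    apply List.filter_congr
    intro ip hip
    rw [PySem.List.mem_enumerate_iff] at hip
    obtain ⟨k, hk, rfl⟩ := hip
    simp only [zero_add]
    apply bool_ext
    simp only [List.any_eq_true]
    constructor
    · rintro ⟨j, hjr, hdom⟩
      rw [PySem.List.mem_pyRange_one] at hjr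
      rw [PySem.List.len_eq] at hjr
      have h0 : 0 ≤ j := by omega
      have h1 : j < (S.length : Int) := hjr.2
      rw [PySem.List.pyGetD_eq_getElem S (0,0) h0 h1] at hdom
      exact ⟨S[j.toNat], List.getElem_mem _, hdom⟩
    · rintro ⟨q, hq, hdom⟩
      rw [List.mem_iff_getElem] at hq
      obtain ⟨j, hj, rfl⟩ := hq
      have hkj : k < j := by
        rcases Nat.lt_trichotomy j k with h' | h' | h'
        · exfalso
          have hp := List.pairwise_iff_getElem.mp hs j k hj hk h'
          have := dom_sKey hdom
          omega
        · exfalso; subst h'; rw [dom_self] at hdom; cases hdom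
        · exact h'
      refine ⟨(j : Int), ?_, ?_⟩
      · rw [PySem.List.mem_pyRange_one, PySem.List.len_eq]
        constructor <;> [omega; exact_mod_cast hj]
      · have h0 : 0 ≤ (j : Int) := by omega
        have h1 : (j : Int) < (S.length : Int) := by exact_mod_cast hj
        rw [PySem.List.pyGetD_eq_getElem S (0,0) h0 h1]
        simpa using hdom
  rw [hcongr]
  exact enum_filter_snd (fun p => S.any (fun q => pyDominated p q)) 0 S

-- hgt is unchanged when a point below everything (in sum) is prepended
theorem hgt_cons (p : Int × Int) (t : List (Int × Int)) (hp : ∀ r ∈ t, sKey p ≤ sKey r) :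
    ∀ q, sKey p ≤ sKey q → hgt (p :: t) q = hgt t q := by
  suffices h : ∀ n : Nat, ∀ q, t.countP (fun r => decide (sKey q < sKey r)) < n →
      sKey p ≤ sKey q → hgt (p :: t) q = hgt t q by
    intro q hq
    exact h _ q (Nat.lt_succ_self _) hq
  intro n
  induction n with
  | zero => intro q h; exact absurd h (Nat.not_lt_zero _)
  | succ n ih =>
    intro q hcnt hpq
    rw [hgt_eq (p :: t) q, hgt_eq t q]
    have hdf : pyDominated q p = false := by
      have : ¬ (q.1 < p.1 ∧ q.2 < p.2) := by unfold sKey at hpq; omega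
      simp [pyDominated]; omega
    rw [List.filter_cons_of_neg (by simp [hdf])]
    congr 1
    apply congrArg mmax
    apply List.map_congr_left
    intro r hr
    rw [List.mem_filter] at hr
    apply ih r _ (hp r hr.1)
    have hlt : t.countP (fun x => decide (sKey r < sKey x)) < t.countP (fun x => decide (sKey q < sKey x)) := by
      apply countP_lt_countP t _ _
        (fun x hx => by simp only [decide_eq_true_eq] at *; have := dom_sKey hr.2; omega)
        r hr.1 (by simp [dom_sKey hr.2]) (by simp)
    omega

-- B's inner scan computes a max over dominators
theorem foldB_inner1 (p : Int × Int) (l : List ((Int × Int) × Int)) :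
    ∀ a : Int, l.foldl (fun m qh =>
        if decide (qh.2 > m) && decide (p.1 < qh.1.1) && decide (p.2 < qh.1.2) then qh.2 else m) a
      = l.foldl (fun m qh => if pyDominated p qh.1 then max m qh.2 else m) a := by
  induction l with
  | nil => intro a; rfl
  | cons x l ih =>
    intro a
    simp only [List.foldl_cons]
    rw [show (if decide (x.2 > a) && decide (p.1 < x.1.1) && decide (p.2 < x.1.2) then x.2 else a)
        = (if pyDominated p x.1 then max a x.2 else a) from ?_, ih]
    by_cases h1 : p.1 < x.1.1 <;> by_cases h2 : p.2 < x.1.2 <;> by_cases h3 : a < x.2 <;>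
      simp [pyDominated, h1, h2, h3, gt_iff_lt]
    · exact h3.le
    · exact not_lt.mp h3

theorem foldB_inner2 (p : Int × Int) (l : List ((Int × Int) × Int)) :
    ∀ a : Int, l.foldl (fun m qh => if pyDominated p qh.1 then max m qh.2 else m) a
      = ((l.filter (fun qh => pyDominated p qh.1)).map Prod.snd).foldl max a := by
  induction l with
  | nil => intro a; rfl
  | cons x l ih =>
    intro a
    by_cases h : pyDominated p x.1 = true <;>
      simp [h, List.foldl_cons, ih]

-- B's fold invariant: the accumulator carries the heights of the processed suffix
theorem foldB (s : List (Int × Int)) (hs : Srt s) :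
    s.foldr (fun x acc => pvStepB acc x) ([], 0)
      = (s.reverse.map (fun q => (q, hgt s q)), maxH s) := by
  induction s with
  | nil => simp [maxH, mmax_nil]
  | cons p t ih =>
    unfold Srt at hs
    rw [List.pairwise_cons] at hs
    obtain ⟨hp, hst⟩ := hs
    have hst : Srt t := hst
    rw [List.foldr_cons, ih hst]
    unfold pvStepB
    have hm : (t.reverse.map (fun q => (q, hgt t q))).foldl (fun m qh =>
        if decide (qh.2 > m) && decide (p.1 < qh.1.1) && decide (p.2 < qh.1.2) then qh.2 else m) 0
        = mmax ((t.filter (fun q => pyDominated p q)).map (hgt t)) := by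
      rw [foldB_inner1, foldB_inner2]
      have hfm : (t.reverse.map (fun q => (q, hgt t q))).filter (fun qh => pyDominated p qh.1)
          = (t.reverse.filter (fun q => pyDominated p q)).map (fun q => (q, hgt t q)) := by
        rw [List.filter_map]
        rfl
      rw [hfm, List.map_map]
      have : ((t.reverse.filter (fun q => pyDominated p q)).map (Prod.snd ∘ fun q => (q, hgt t q)))
          = ((t.filter (fun q => pyDominated p q)).map (hgt t)).reverse := by
        rw [List.filter_reverse, ← List.map_reverse]
        rfl
      rw [this, foldl_max_eq_mmax, mmax_reverse]
    rw [hm]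
    have hhp : mmax ((t.filter (fun q => pyDominated p q)).map (hgt t)) + 1 = hgt (p :: t) p := by
      rw [hgt_eq (p :: t) p]
      rw [List.filter_cons_of_neg (by simp [dom_self])]
      have : (t.filter (fun q => pyDominated p q)).map (hgt (p :: t))
          = (t.filter (fun q => pyDominated p q)).map (hgt t) := by
        apply List.map_congr_left
        intro r hr
        rw [List.mem_filter] at hr
        exact hgt_cons p t hp r (hp r hr.1)
      rw [this]; omega
    have hmap : t.reverse.map (fun q => (q, hgt t q)) = t.reverse.map (fun q => (q, hgt (p :: t) q)) := by
      apply List.map_congr_left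
      intro r hr
      rw [List.mem_reverse] at hr
      rw [hgt_cons p t hp r (hp r hr)]
    have hmaxH : maxH (p :: t) = max (hgt (p :: t) p) (maxH t) := by
      unfold maxH
      rw [List.map_cons, mmax_cons]
      congr 2
      apply List.map_congr_left
      intro r hr
      rw [hgt_cons p t hp r (hp r hr)]
    refine Prod.ext ?_ ?_
    · show t.reverse.map (fun q => (q, hgt t q)) ++ [(p, _)] = (p :: t).reverse.map _
      rw [List.reverse_cons, List.map_append, hmap, hhp]
      rfl
    · show (if _ + 1 > maxH t then _ + 1 else maxH t) = maxH (p :: t)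
      rw [hhp, hmaxH]
      by_cases h : hgt (p :: t) p > maxH t
      · rw [if_pos h, max_eq_left h.le]
      · rw [if_neg h, max_eq_right (not_lt.mp h)]

-- A's loop computes the max height on a sorted list
theorem loopA (n : Nat) : ∀ S acc, S.length ≤ n → Srt S → pvLoopA S acc = acc + maxH S := by
  induction n with
  | zero =>
    intro S acc hlen _
    have hnil : S = [] := List.length_eq_zero_iff.mp (by omega)
    subst hnil
    rw [pvLoopA]
    simp [maxH, mmax_nil]
  | succ n ih =>
    intro S acc hlen hs
    rw [pvLoopA]
    by_cases h : S.length > 0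
    · simp only [h, dif_pos]
      have hne : S ≠ [] := by intro hc; subst hc; simp at h
      have hlt := pvKeep_length_lt S hne
      rw [pvKeep_eq_filt S hs]
      have hsrt' : Srt (filt S) := by
        unfold Srt filt
        exact List.Pairwise.sublist List.filter_sublist hs
      have hlen' : (filt S).length ≤ n := by
        rw [← pvKeep_eq_filt S hs]; omega
      rw [ih (filt S) (acc + 1) hlen' hsrt', maxH_filt S hne]
      have := maxH_pos S hne
      omega
    · simp only [h, dif_neg, not_false_iff]
      have hnil : S = [] := List.length_eq_zero_iff.mp (by omega)
      subst hnil
      simp [maxH, mmax_nil]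

-- ===== VERDICT (by name: the statement is the Claim_ definition above) =====
theorem count_maximal_layers_spec : Claim_equal_count_maximal_layers := by
  intro points _
  unfold Spec_count_maximal_layers count_maximal_layers count_maximal_layers_alt
  have hs : Srt (PySem.List.sorted points (fun p => p.1 + p.2)) :=
    PySem.List.sorted_pairwise points (fun p => p.1 + p.2)
  rw [List.foldl_reverse, foldB _ hs, loopA _ _ 0 le_rfl hs]
  omega
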